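-- pv_equiv track=rewrite | github.com/120211wq/wq_projects | Xdeas_platform_new/common/Convert.py | getElectorAlarm
-- ===== SOURCE A (Python) =====
-- def int_to_hex(num, rjust):
--     chaDic = {10: 'a', 11: 'b', 12: 'c', 13: 'd', 14: 'e', 15: 'f'}
--     hexStr = ""
--
--     if num < 0:
--         num = num + 2 ** 32
--
--     while num >= 16:
--         digit = num % 16
--         hexStr = chaDic.get(digit, str(digit)) + hexStr
--         num //= 16
--     hexStr = chaDic.get(num, str(num)) + hexStr
--     return hexStr.rjust(rjust, '0')
--
-- def getElectorAlarm(alarm_list):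
--     alarm_data = ''
--     for i in range(6):
--         if i + 1 in alarm_list:
--             alarm_data += '1'
--         else:
--             alarm_data += '0'
--     return int_to_hex(int(alarm_data[::-1], 2), 4)
-- ===== SOURCE B (Python) =====
-- def getElectorAlarm(alarm_list):
--     mask = 0
--     for v in range(1, 7):
--         if v in alarm_list:
--             mask |= 1 << (v - 1)
--     return format(mask, '04x')
-- ===== Notes on version B (the rewrite author's own statement) =====
-- stated objective: simpler
-- what changed: B accumulates an integer bitmask directly (OR-ing 1<<(v-1) for v in 1..6) and formats it with format(mask,'04x'), eliminating A's build-a-bit-string, reverse, int(...,2) parse and hand-written hex converter.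
import Mathlib
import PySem

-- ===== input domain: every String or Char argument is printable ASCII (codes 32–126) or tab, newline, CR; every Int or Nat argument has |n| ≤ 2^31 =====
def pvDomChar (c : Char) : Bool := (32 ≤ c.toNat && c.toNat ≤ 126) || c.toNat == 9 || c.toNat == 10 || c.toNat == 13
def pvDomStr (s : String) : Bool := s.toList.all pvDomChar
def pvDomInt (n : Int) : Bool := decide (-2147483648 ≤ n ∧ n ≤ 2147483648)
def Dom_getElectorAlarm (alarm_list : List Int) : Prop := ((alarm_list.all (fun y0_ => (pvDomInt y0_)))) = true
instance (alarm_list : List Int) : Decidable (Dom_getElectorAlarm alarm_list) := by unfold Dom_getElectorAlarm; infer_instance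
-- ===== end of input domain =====

-- ===== PORT A =====
-- B replaces the bit-string/reverse/int(...,2)/hand-rolled-hex pipeline with an integer bitmask + hex format (objective: simpler).

-- chaDic.get(d, str(d)) from int_to_hex
def pvChaDicGet (d : Int) : List Char :=
  if d = 10 then ['a'] else if d = 11 then ['b'] else if d = 12 then ['c']
  else if d = 13 then ['d'] else if d = 14 then ['e'] else if d = 15 then ['f']
  else PySem.Int.toChars d

-- the `while num >= 16` loop of int_to_hex; fuel only makes the recursion structural
-- (64 iterations cover any |num| ≤ 2^64, far beyond the ≤ 2^32 values reached here)
def pvIntToHexLoop : Nat → Int → List Char → Int × List Char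
  | 0, num, hexStr => (num, hexStr)
  | fuel+1, num, hexStr =>
    if 16 ≤ num then
      pvIntToHexLoop fuel (PySem.Int.floordiv num 16)
        (pvChaDicGet (PySem.Int.mod num 16) ++ hexStr)
    else (num, hexStr)

-- int_to_hex(num, rjust); hexStr.rjust(rjust, '0') ported by hand as left-pad with '0' (exact)
def pvIntToHex (num : Int) (rjust : Int) : String :=
  let num1 := if num < 0 then num + 2 ^ 32 else num
  let p := pvIntToHexLoop 64 num1 []
  let hexStr := pvChaDicGet p.1 ++ p.2
  String.ofList (List.replicate (rjust.toNat - hexStr.length) '0' ++ hexStr)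

def getElectorAlarm (alarm_list : List Int) : String :=
  -- for i in range(6): alarm_data += '1' if i+1 in alarm_list else '0'
  let alarm_data := (PySem.List.pyRange 0 6 1).foldl
    (fun s i => s ++ (if (i + 1) ∈ alarm_list then ['1'] else ['0'])) ([] : List Char)
  -- alarm_data[::-1] is List.reverse (PySem.List.slice?_none_none_neg_one);
  -- int(s, 2) is PySem.Int.ofCharsBase?; always `some` here (6 chars, all '0'/'1'), so .getD 0 is exact
  pvIntToHex ((PySem.Int.ofCharsBase? alarm_data.reverse 2).getD 0) 4

-- ===== PORT B =====
-- format(mask, '04x'): lowercase hex digits (Nat.toDigits 16), left-padded with '0' to width 4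
def pvFormat04x (mask : Nat) : String :=
  let ds := Nat.toDigits 16 mask
  String.ofList (List.replicate (4 - ds.length) '0' ++ ds)

def getElectorAlarm_alt (alarm_list : List Int) : String :=
  let mask := (PySem.List.pyRange 1 7 1).foldl
    (fun m v => if v ∈ alarm_list then m ||| (1 <<< (v - 1).toNat) else m) (0 : Nat)
  pvFormat04x mask

-- ===== PRECONDITION & SPEC =====

def Spec_getElectorAlarm (alarm_list : List Int) (out : String) : Prop := out = getElectorAlarm_alt alarm_list
instance (alarm_list : List Int) (out : String) : Decidable (Spec_getElectorAlarm alarm_list out) := by unfold Spec_getElectorAlarm; infer_instance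

-- ===== CLAIM (what is proved, stated in full; the proofs are below) =====
def Claim_equal_getElectorAlarm : Prop := ∀ (alarm_list : List Int), Dom_getElectorAlarm alarm_list → Spec_getElectorAlarm alarm_list (getElectorAlarm alarm_list)

-- ===== LEMMAS AND PROOFS =====
theorem pvPyRange06 : PySem.List.pyRange 0 6 1 = [0, 1, 2, 3, 4, 5] := by decide
theorem pvPyRange17 : PySem.List.pyRange 1 7 1 = [1, 2, 3, 4, 5, 6] := by decide

-- ===== VERDICT (by name: the statement is the Claim_ definition above) =====
theorem getElectorAlarm_spec : Claim_equal_getElectorAlarm := by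
  intro l _
  unfold Spec_getElectorAlarm getElectorAlarm getElectorAlarm_alt
  by_cases h1 : (1 : Int) ∈ l <;> by_cases h2 : (2 : Int) ∈ l <;>
    by_cases h3 : (3 : Int) ∈ l <;> by_cases h4 : (4 : Int) ∈ l <;>
    by_cases h5 : (5 : Int) ∈ l <;> by_cases h6 : (6 : Int) ∈ l <;>
    simp [pvPyRange06, pvPyRange17, h1, h2, h3, h4, h5, h6] <;> decide
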